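-- pv_equiv track=rewrite | github.com/Stepanvar/MetaGap | MetaGap/MetagapUserCode/tests/test_large_merge_workflow.py | _parse_mapping_body
-- ===== SOURCE A (Python) =====
-- from collections import OrderedDict
--
-- def _parse_mapping_body(body: str):
--     mapping = OrderedDict()
--     token = []
--     in_quotes = False
--     escape = False
--
--     def _flush():
--         if not token:
--             return
--         raw = "".join(token).strip()
--         token.clear()
--         if not raw or "=" not in raw:
--             return
--         key, value = raw.split("=", 1)
--         mapping[key.strip()] = value.strip()
--
--     for char in body:
--         if escape:
--             token.append(char)
--             escape = False
--             continue
--         if char == "\\":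
--             token.append(char)
--             escape = True
--             continue
--         if char == '"':
--             in_quotes = not in_quotes
--             token.append(char)
--             continue
--         if char == "," and not in_quotes:
--             _flush()
--             continue
--         token.append(char)
--     _flush()
--     return mapping
-- ===== SOURCE B (Python) =====
-- from collections import OrderedDict
--
-- def _parse_mapping_body(body: str):
--     # pass 1: record indices of every unquoted, unescaped comma
--     cuts = []
--     in_quotes = False
--     escape = False
--     for i, ch in enumerate(body):
--         if escape:
--             escape = False
--         elif ch == "\\":
--             escape = True
--         elif ch == '"':
--             in_quotes = not in_quotes
--         elif ch == "," and not in_quotes: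
--             cuts.append(i)
--     # pass 2: slice body between the cuts and parse each segment
--     mapping = OrderedDict()
--     start = 0
--     for cut in cuts + [len(body)]:
--         raw = body[start:cut].strip()
--         start = cut + 1
--         if raw and "=" in raw:
--             key, value = raw.split("=", 1)
--             mapping[key.strip()] = value.strip()
--     return mapping
-- ===== Notes on version B (the rewrite author's own statement) =====
-- stated objective: alternative
-- what changed: Replaces A's single pass with an inline token buffer and flush-at-comma by a two-pass decomposition: a first scan records the indices of unquoted, unescaped commas, then a second pass slices the body between consecutive cuts and parses each stripped segment into the mapping.
import Mathlib
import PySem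

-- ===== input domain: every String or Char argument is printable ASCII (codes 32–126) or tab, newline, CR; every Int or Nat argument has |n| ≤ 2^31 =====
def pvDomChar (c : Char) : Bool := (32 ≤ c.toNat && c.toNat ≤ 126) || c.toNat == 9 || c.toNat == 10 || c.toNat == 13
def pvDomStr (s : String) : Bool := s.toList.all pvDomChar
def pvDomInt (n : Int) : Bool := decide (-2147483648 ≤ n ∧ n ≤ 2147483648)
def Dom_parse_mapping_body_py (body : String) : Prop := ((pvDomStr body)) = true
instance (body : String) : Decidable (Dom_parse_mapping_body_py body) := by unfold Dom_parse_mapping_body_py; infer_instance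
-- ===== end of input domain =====

-- B replaces A's single pass with an inline token buffer by an index-finding scan over the
-- commas plus a separate slice-and-parse pass (objective: alternative decomposition, same cost).

-- ===== PORT A =====
-- _flush: '"".join(token).strip()', 'not raw or "=" not in raw', 'raw.split("=", 1)';
-- '"=" in raw' is ported as Chars.isIn on the one-char list (exact).
def pvFlushA (m : PySem.Dict String String) (tok : List Char) : PySem.Dict String String :=
  if tok = [] then m
  else
    let raw := PySem.Chars.strip tok
    if raw = [] ∨ PySem.Chars.isIn ['='] raw = false then m
    else
      match PySem.Chars.splitOnMax raw ['='] 1 with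
      | [key, value] =>
          m.insert (String.ofList (PySem.Chars.strip key)) (String.ofList (PySem.Chars.strip value))
      | _ => m   -- unreachable: split(sep, 1) with sep present yields exactly two parts

-- the 'for char in body' loop; state = (mapping, token, in_quotes, escape); ends with a final flush
def pvLoopA (cs : List Char) (m : PySem.Dict String String) (tok : List Char)
    (q e : Bool) : PySem.Dict String String :=
  match cs with
  | [] => pvFlushA m tok
  | c :: rest =>
    if e then pvLoopA rest m (tok ++ [c]) q false
    else if c = '\\' then pvLoopA rest m (tok ++ [c]) q true
    else if c = '"' then pvLoopA rest m (tok ++ [c]) (!q) e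
    else if c = ',' ∧ q = false then pvLoopA rest (pvFlushA m tok) [] q e
    else pvLoopA rest m (tok ++ [c]) q e

def parse_mapping_body_py (body : String) : List (String × String) :=
  (pvLoopA body.toList PySem.Dict.empty [] false false).items

-- ===== PORT B =====
-- pass 1: indices of every unquoted, unescaped comma
def pvCutsB (cs : List Char) (i : Int) (q e : Bool) : List Int :=
  match cs with
  | [] => []
  | c :: rest =>
    if e then pvCutsB rest (i + 1) q false
    else if c = '\\' then pvCutsB rest (i + 1) q true
    else if c = '"' then pvCutsB rest (i + 1) (!q) e
    else if c = ',' ∧ q = false then i :: pvCutsB rest (i + 1) q e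
    else pvCutsB rest (i + 1) q e

-- parse one stripped segment into the mapping
def pvSegB (m : PySem.Dict String String) (seg : List Char) : PySem.Dict String String :=
  let raw := PySem.Chars.strip seg
  if raw = [] then m
  else if PySem.Chars.isIn ['='] raw = false then m
  else
    match PySem.Chars.splitOnMax raw ['='] 1 with
    | [key, value] =>
        m.insert (String.ofList (PySem.Chars.strip key)) (String.ofList (PySem.Chars.strip value))
    | _ => m   -- unreachable

-- pass 2: 'for cut in cuts + [len(body)]: raw = body[start:cut] …'
def pvLoopB (body : List Char) (cuts : List Int) (start : Int)
    (m : PySem.Dict String String) : PySem.Dict String String :=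
  match cuts with
  | [] => m
  | cut :: rest =>
      pvLoopB body rest (cut + 1) (pvSegB m (PySem.List.slice body (some start) (some cut)))

def parse_mapping_body_py_alt (body : String) : List (String × String) :=
  (pvLoopB body.toList
      (pvCutsB body.toList 0 false false ++ [(body.toList.length : Int)])
      0 PySem.Dict.empty).items

-- ===== PRECONDITION & SPEC =====
def Spec_parse_mapping_body_py (body : String) (out : List (String × String)) : Prop := out = parse_mapping_body_py_alt body
instance (body : String) (out : List (String × String)) : Decidable (Spec_parse_mapping_body_py body out) := by unfold Spec_parse_mapping_body_py; infer_instance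

-- ===== CLAIM (what is proved, stated in full; the proofs are below) =====
def Claim_equal_parse_mapping_body_py : Prop := ∀ (body : String), Dom_parse_mapping_body_py body → Spec_parse_mapping_body_py body (parse_mapping_body_py body)

-- ===== LEMMAS AND PROOFS =====

-- A's empty-token early return is redundant in value: flushing a token = parsing the segment
lemma pvFlushA_eq_pvSegB (m : PySem.Dict String String) (tok : List Char) :
    pvFlushA m tok = pvSegB m tok := by
  by_cases h : tok = []
  · subst h
    have hs : PySem.Chars.strip ([] : List Char) = [] := by decide
    simp [pvFlushA, pvSegB, hs]
  · simp only [pvFlushA, pvSegB, if_neg h]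
    by_cases h1 : PySem.Chars.strip tok = []
    · simp [h1]
    · by_cases h2 : PySem.Chars.isIn ['='] (PySem.Chars.strip tok) = false <;>
        simp [h1, h2]

-- main invariant: A's loop on the suffix body.drop i with token body[start:i]
-- equals B's second pass over the remaining cuts (absolute indices) starting at 'start'
lemma loopA_eq_loopB (body : List Char) :
    ∀ (cs : List Char) (i start : Nat) (q e : Bool) (m : PySem.Dict String String),
      body.drop i = cs → start ≤ i →
      pvLoopA cs m ((body.drop start).take (i - start)) q e
        = pvLoopB body (pvCutsB cs (i : Int) q e ++ [(body.length : Int)]) (start : Int) m := by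
  intro cs
  induction cs with
  | nil =>
    intro i start q e m hdrop hle
    have hlen : body.length ≤ i := by
      by_contra h
      have := List.drop_eq_nil_iff.mp hdrop
      omega
    have htok : (body.drop start).take (i - start) = body.drop start := by
      apply List.take_of_length_le
      simp [List.length_drop]; omega
    have hslice : PySem.List.slice body (some (start : Int)) (some (body.length : Int))
        = body.drop start := by
      rw [PySem.List.slice_natCast]
      apply List.take_of_length_le
      simp [List.length_drop]
    have h1 : pvLoopA [] m ((body.drop start).take (i - start)) q e
        = pvFlushA m ((body.drop start).take (i - start)) := rfl
    have h2 : pvCutsB [] (i : Int) q e = [] := rfl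
    have h3 : pvLoopB body ([] ++ [(body.length : Int)]) (start : Int) m
        = pvSegB m (PySem.List.slice body (some (start : Int)) (some (body.length : Int))) := rfl
    rw [h1, h2, h3, hslice, htok, pvFlushA_eq_pvSegB]
  | cons c rest ih =>
    intro i start q e m hdrop hle
    have hi : i < body.length := by
      by_contra h
      have : body.drop i = [] := List.drop_eq_nil_iff.mpr (by omega)
      rw [hdrop] at this; simp at this
    have hdrop' : body.drop (i + 1) = rest := by
      rw [← List.tail_drop, hdrop, List.tail_cons]
    have hget : body[i]? = some c := by
      have : (body.drop i)[0]? = body[i]? := by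
        simp [List.getElem?_drop]
      rw [← this, hdrop]; rfl
    have htok1 : (body.drop start).take (i + 1 - start)
        = (body.drop start).take (i - start) ++ [c] := by
      have h1 : i + 1 - start = (i - start) + 1 := by omega
      have h2 : (body.drop start)[i - start]? = some c := by
        rw [List.getElem?_drop]
        have : start + (i - start) = i := by omega
        rw [this, hget]
      rw [h1, List.take_add_one, h2]; rfl
    have hcast : ((i : Int) + 1) = ((i + 1 : Nat) : Int) := by push_cast; ring
    simp only [pvLoopA, pvCutsB]
    by_cases he : e
    · subst he
      simp only [if_true]
      rw [← htok1, hcast]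
      exact ih (i + 1) start q false m hdrop' (by omega)
    · simp only [Bool.not_eq_true] at he
      subst he
      simp only [Bool.false_eq_true, if_false]
      by_cases hbs : c = '\\'
      · subst hbs
        simp only [if_true]
        rw [← htok1, hcast]
        exact ih (i + 1) start q true m hdrop' (by omega)
      · simp only [if_neg hbs]
        by_cases hq' : c = '"'
        · subst hq'
          simp only [if_true]
          rw [← htok1, hcast]
          exact ih (i + 1) start (!q) false m hdrop' (by omega)
        · simp only [if_neg hq']
          by_cases hcm : c = ',' ∧ q = false
          · obtain ⟨hc, hq⟩ := hcm
            subst hc; subst hq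
            simp only [and_self, if_true, List.cons_append]
            -- flush at the comma: B slices body[start:i] and moves start to i+1
            have hslice : PySem.List.slice body (some (start : Int)) (some (i : Int))
                = (body.drop start).take (i - start) := PySem.List.slice_natCast body start i
            have hstep : pvLoopB body ((i : Int) :: (pvCutsB rest ((i : Int) + 1) false false
                  ++ [(body.length : Int)])) (start : Int) m
                = pvLoopB body (pvCutsB rest ((i : Int) + 1) false false ++ [(body.length : Int)])
                    ((i : Int) + 1)
                    (pvSegB m (PySem.List.slice body (some (start : Int)) (some (i : Int)))) := rfl
            rw [hstep, hslice, ← pvFlushA_eq_pvSegB, hcast]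
            have := ih (i + 1) (i + 1) false false
              (pvFlushA m ((body.drop start).take (i - start))) hdrop' (le_refl _)
            simpa using this
          · simp only [if_neg hcm]
            rw [← htok1, hcast]
            exact ih (i + 1) start q false m hdrop' (by omega)

-- ===== VERDICT (by name: the statement is the Claim_ definition above) =====
theorem parse_mapping_body_py_spec : Claim_equal_parse_mapping_body_py := by
  intro body _
  unfold Spec_parse_mapping_body_py parse_mapping_body_py parse_mapping_body_py_alt
  have h := loopA_eq_loopB body.toList body.toList 0 0 false false PySem.Dict.empty rfl
    (le_refl 0)
  simp only [List.drop_zero, Nat.sub_zero, List.take_zero, Nat.cast_zero] at h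
  rw [h]
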